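-- pv_equiv track=rewrite | github.com/Bmw4134/TRAXOVO_V1 | routes/fleet_analytics_backup.py | map_to_project
-- ===== SOURCE A (Python) =====
-- def map_to_project(asset_id):
--     """Map asset to likely project based on your job assignments"""
--     project_mapping = {
--         'PT': '2024-016',
--         'EX': '2024-030',
--         'LD': '2024-025',
--         'BH': '2023-034'
--     }
--
--     for prefix, project in project_mapping.items():
--         if asset_id.startswith(prefix):
--             return project
--     return '2023-032'  # Default project
-- ===== SOURCE B (Python) =====
-- def map_to_project(asset_id):
--     """Map asset to likely project based on your job assignments"""
--     project_mapping = {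
--         'PT': '2024-016',
--         'EX': '2024-030',
--         'LD': '2024-025',
--         'BH': '2023-034'
--     }
--     return project_mapping.get(asset_id[:2], '2023-032')
-- ===== Notes on version B (the rewrite author's own statement) =====
-- stated objective: simpler
-- what changed: Replaces the loop over the mapping with startswith tests by a single keyed lookup on the 2-character slice asset_id[:2] (all prefixes have length 2 and are disjoint), same dict literal and default.
import Mathlib
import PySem

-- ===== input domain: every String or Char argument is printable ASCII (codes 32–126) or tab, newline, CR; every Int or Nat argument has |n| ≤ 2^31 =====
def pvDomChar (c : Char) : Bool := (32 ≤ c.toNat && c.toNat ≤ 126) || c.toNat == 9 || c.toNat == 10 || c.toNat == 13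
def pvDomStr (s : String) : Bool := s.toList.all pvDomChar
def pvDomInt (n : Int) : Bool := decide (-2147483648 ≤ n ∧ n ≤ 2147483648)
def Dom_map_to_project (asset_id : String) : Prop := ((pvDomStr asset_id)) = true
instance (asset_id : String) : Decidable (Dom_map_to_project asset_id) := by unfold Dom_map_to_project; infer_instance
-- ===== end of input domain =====

-- B replaces A's startswith loop over the mapping by one keyed lookup on the 2-character slice asset_id[:2] (simpler).


-- ===== PORT A =====
-- the for-loop over project_mapping.items() with an early return
def mapToProjectLoop (asset_id : String) : List (String × String) → String
  | [] => "2023-032"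
  | (pfx, project) :: rest =>
      if PySem.Str.startswith asset_id pfx then project
      else mapToProjectLoop asset_id rest

def map_to_project (asset_id : String) : String :=
  let project_mapping : PySem.Dict String String :=
    PySem.Dict.ofList [("PT", "2024-016"), ("EX", "2024-030"), ("LD", "2024-025"), ("BH", "2023-034")]
  mapToProjectLoop asset_id project_mapping.items

-- ===== PORT B =====
def map_to_project_alt (asset_id : String) : String :=
  let project_mapping : PySem.Dict String String :=
    PySem.Dict.ofList [("PT", "2024-016"), ("EX", "2024-030"), ("LD", "2024-025"), ("BH", "2023-034")]
  project_mapping.getD (PySem.Str.slice asset_id none (some 2)) "2023-032"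

-- ===== PRECONDITION & SPEC =====
def Spec_map_to_project (asset_id : String) (out : String) : Prop := out = map_to_project_alt asset_id
instance (asset_id : String) (out : String) : Decidable (Spec_map_to_project asset_id out) := by unfold Spec_map_to_project; infer_instance

-- ===== CLAIM (what is proved, stated in full; the proofs are below) =====
def Claim_equal_map_to_project : Prop := ∀ (asset_id : String), Dom_map_to_project asset_id → Spec_map_to_project asset_id (map_to_project asset_id)

-- ===== LEMMAS AND PROOFS =====

-- asset_id[:2] as a list of chars
theorem toList_slice_two (s : String) :
    (PySem.Str.slice s none (some 2)).toList = s.toList.take 2 := by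
  simp [pysem]

-- startswith with a 2-char prefix is a condition on the first two chars
theorem startswith_take_two (s : String) (a b : Char) :
    PySem.Str.startswith s (String.ofList [a, b]) = true ↔ s.toList.take 2 = [a, b] := by
  simp only [PySem.Str.startswith_eq, String.toList_ofList, PySem.Chars.startswith_iff,
    List.prefix_iff_eq_take, List.length_cons, List.length_nil]
  exact eq_comm

-- the slice equals a 2-char string iff the first two chars match
theorem slice_eq_two (s : String) (a b : Char) :
    PySem.Str.slice s none (some 2) = String.ofList [a, b] ↔ s.toList.take 2 = [a, b] := by
  constructor
  · intro h
    have := congrArg String.toList h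
    rwa [toList_slice_two, String.toList_ofList] at this
  · intro h
    exact String.toList_inj.mp (by rw [toList_slice_two, h, String.toList_ofList])

-- B's lookup on the literal dict, written out as an if-chain
theorem getD_mapping (t : String) :
    (PySem.Dict.ofList [("PT", "2024-016"), ("EX", "2024-030"), ("LD", "2024-025"), ("BH", "2023-034")] :
        PySem.Dict String String).getD t "2023-032" =
    if t = "PT" then "2024-016" else if t = "EX" then "2024-030"
    else if t = "LD" then "2024-025" else if t = "BH" then "2023-034" else "2023-032" := by
  rw [show (PySem.Dict.ofList [("PT", "2024-016"), ("EX", "2024-030"), ("LD", "2024-025"), ("BH", "2023-034")] :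
        PySem.Dict String String) =
      PySem.Dict.mk [("PT", "2024-016"), ("EX", "2024-030"), ("LD", "2024-025"), ("BH", "2023-034")] from by decide]
  rw [PySem.Dict.getD_eq_get?_getD,
    PySem.Dict.get?_mk_cons, PySem.Dict.get?_mk_cons, PySem.Dict.get?_mk_cons, PySem.Dict.get?_mk_cons]
  simp only [beq_iff_eq]
  by_cases h1 : t = "PT" <;> by_cases h2 : t = "EX" <;> by_cases h3 : t = "LD" <;> by_cases h4 : t = "BH" <;>
    simp_all [eq_comm, PySem.Dict.get?]

theorem map_to_project_eq (s : String) : map_to_project s = map_to_project_alt s := by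
  simp only [map_to_project, map_to_project_alt]
  rw [show (PySem.Dict.ofList [("PT", "2024-016"), ("EX", "2024-030"), ("LD", "2024-025"), ("BH", "2023-034")] :
        PySem.Dict String String).items =
      [("PT", "2024-016"), ("EX", "2024-030"), ("LD", "2024-025"), ("BH", "2023-034")] from by decide]
  rw [getD_mapping]
  simp only [mapToProjectLoop]
  simp only
    [show (PySem.Str.startswith s "PT" = true) = (s.toList.take 2 = ['P','T']) from propext (startswith_take_two s 'P' 'T'),
     show (PySem.Str.startswith s "EX" = true) = (s.toList.take 2 = ['E','X']) from propext (startswith_take_two s 'E' 'X'),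
     show (PySem.Str.startswith s "LD" = true) = (s.toList.take 2 = ['L','D']) from propext (startswith_take_two s 'L' 'D'),
     show (PySem.Str.startswith s "BH" = true) = (s.toList.take 2 = ['B','H']) from propext (startswith_take_two s 'B' 'H'),
     show (PySem.Str.slice s none (some 2) = "PT") = (s.toList.take 2 = ['P','T']) from propext (slice_eq_two s 'P' 'T'),
     show (PySem.Str.slice s none (some 2) = "EX") = (s.toList.take 2 = ['E','X']) from propext (slice_eq_two s 'E' 'X'),
     show (PySem.Str.slice s none (some 2) = "LD") = (s.toList.take 2 = ['L','D']) from propext (slice_eq_two s 'L' 'D'),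
     show (PySem.Str.slice s none (some 2) = "BH") = (s.toList.take 2 = ['B','H']) from propext (slice_eq_two s 'B' 'H')]

-- ===== VERDICT (by name: the statement is the Claim_ definition above) =====
theorem map_to_project_spec : Claim_equal_map_to_project := by
  intro s _
  simpa [Spec_map_to_project] using map_to_project_eq s
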